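-- pv_equiv track=rewrite | github.com/Devine98/block | src/block/phrase_mining/models/rf_model/feature_extractor.py | _find_phrase_idx
-- ===== SOURCE A (Python) =====
-- from typing import Dict, List, Tuple
--
-- def _find_phrase_idx(phrase_list: List[tuple], token_text: List[str]) -> Dict:
--     """find the location index of a given list'phrase_list' in
--     the original tokenized text'token_text'
--
--     Args:
--         phrase_list (List[tuple]): target words you need to find,
--                                     like [('free','fire'),('cs','mode')]
--         token_text (List[str]):
--
--     Returns:
--         Dict: e.g {('free','fire'):[[1,3],[11,13]]}
--     """
--     phrases_idx_dict = {}
--     for phrase in phrase_list: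
--         phrase_loc = []
--         for i, word in enumerate(token_text):
--             if list(phrase) == token_text[i : i + len(phrase)]:
--                 phrase_loc.append([i, i + len(phrase) - 1])
--         if len(phrase_loc) > 0:
--             phrases_idx_dict[phrase] = phrase_loc
--     return phrases_idx_dict
-- ===== SOURCE B (Python) =====
-- from typing import Dict, List
--
-- def _find_phrase_idx(phrase_list: List[tuple], token_text: List[str]) -> Dict:
--     # Index each token's positions once, then verify every phrase only at the
--     # positions where its first word occurs, instead of scanning all of
--     # token_text for every phrase.
--     starts = {}
--     for i, word in enumerate(token_text):
--         starts.setdefault(word, []).append(i)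
--     result = {}
--     for phrase in phrase_list:
--         p = list(phrase)
--         L = len(p)
--         locs = [[i, i + L - 1] for i in starts.get(p[0], [])
--                 if token_text[i:i + L] == p]
--         if locs:
--             result[phrase] = locs
--     return result
-- ===== Notes on version B (the rewrite author's own statement) =====
-- stated objective: alternative
-- what changed: B builds a one-pass positional index from each token to its occurrence indices and verifies every phrase only at the positions of its first word, instead of A's full scan of token_text for every phrase; Pre_ excludes phrase lists containing an empty phrase, where A's value [[i, i-1] for every i] is an accidental artefact of slicing with length 0 and B's p[0] lookup raises IndexError.
-- outside the precondition, e.g. on _find_phrase_idx([()], ['a', 'b']): A returns {(): [[0, -1], [1, 0]]}, B raises IndexError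
import Mathlib
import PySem

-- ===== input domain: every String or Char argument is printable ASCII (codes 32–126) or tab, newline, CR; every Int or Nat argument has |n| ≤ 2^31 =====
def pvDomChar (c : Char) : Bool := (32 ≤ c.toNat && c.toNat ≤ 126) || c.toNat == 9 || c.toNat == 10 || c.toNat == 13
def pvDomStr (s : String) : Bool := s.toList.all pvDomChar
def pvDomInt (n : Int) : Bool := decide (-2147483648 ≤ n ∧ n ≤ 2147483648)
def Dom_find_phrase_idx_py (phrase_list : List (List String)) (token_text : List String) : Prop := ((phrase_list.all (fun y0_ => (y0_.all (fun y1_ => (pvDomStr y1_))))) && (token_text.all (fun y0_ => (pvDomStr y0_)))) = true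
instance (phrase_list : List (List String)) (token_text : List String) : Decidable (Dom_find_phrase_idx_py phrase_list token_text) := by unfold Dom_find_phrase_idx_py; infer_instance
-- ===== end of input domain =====

-- B replaces A's per-phrase full scan of token_text by a positional index of the
-- tokens built once, verifying each phrase only at its first word's positions (alternative algorithm).

-- ===== PORT A =====
def find_phrase_idx_py (phrase_list : List (List String)) (token_text : List String) : List (List String × List (List Int)) :=
  (phrase_list.foldl (fun d phrase =>
      let phrase_loc :=
        (PySem.List.enumerate token_text 0).foldl (fun acc p =>
          if phrase == PySem.List.slice token_text (some p.1) (some (p.1 + (phrase.length : Int))) then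
            acc ++ [[p.1, p.1 + (phrase.length : Int) - 1]]
          else acc) []
      if phrase_loc.length > 0 then d.insert phrase phrase_loc else d)
    PySem.Dict.empty).items

-- ===== PORT B =====
-- starts[word] = list of positions of word in token_text (Python: setdefault/append loop)
def pvStarts (token_text : List String) : PySem.Dict String (List Int) :=
  ((PySem.List.enumerate token_text 0).map (fun p => (p.2, p.1))).foldl
    (fun d q => d.modify q.1 [] (· ++ [q.2])) PySem.Dict.empty

-- per-phrase occurrence list: check only the positions of the phrase's first word
-- (Python's p[0] raises IndexError on an empty phrase — outside Pre_; the [] case here is a stub)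
def pvLocs (starts : PySem.Dict String (List Int)) (token_text : List String) (phrase : List String) : List (List Int) :=
  match phrase with
  | [] => []
  | w :: _ =>
      ((starts.getD w []).filter (fun i =>
          phrase == PySem.List.slice token_text (some i) (some (i + (phrase.length : Int))))).map
        (fun i => [i, i + (phrase.length : Int) - 1])

def find_phrase_idx_py_alt (phrase_list : List (List String)) (token_text : List String) : List (List String × List (List Int)) :=
  let starts := pvStarts token_text
  (phrase_list.foldl (fun d phrase =>
      let locs := pvLocs starts token_text phrase
      if locs ≠ [] then d.insert phrase locs else d)
    PySem.Dict.empty).items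

-- ===== PRECONDITION & SPEC =====
-- Pre_ excludes phrase lists containing an empty phrase: there A's [[i, i-1]] ranges with end < start
-- are an accidental artefact of zero-length slicing, and B's natural p[0] lookup raises IndexError.
def Pre_find_phrase_idx_py (phrase_list : List (List String)) (token_text : List String) : Prop :=
  ∀ phrase ∈ phrase_list, phrase ≠ []
instance (phrase_list : List (List String)) (token_text : List String) : Decidable (Pre_find_phrase_idx_py phrase_list token_text) := by unfold Pre_find_phrase_idx_py; infer_instance

def pvWitness_find_phrase_idx_py : List (List String) × List String :=
  ([["free", "fire"], ["cs", "mode"]], ["free", "fire", "cs", "mode", "free", "fire"])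

def Spec_find_phrase_idx_py (phrase_list : List (List String)) (token_text : List String) (out : List (List String × List (List Int))) : Prop := out = find_phrase_idx_py_alt phrase_list token_text
instance (phrase_list : List (List String)) (token_text : List String) (out : List (List String × List (List Int))) : Decidable (Spec_find_phrase_idx_py phrase_list token_text out) := by unfold Spec_find_phrase_idx_py; infer_instance

-- ===== CLAIM (what is proved, stated in full; the proofs are below) =====
def Claim_equal_find_phrase_idx_py : Prop := ∀ (phrase_list : List (List String)) (token_text : List String), Dom_find_phrase_idx_py phrase_list token_text → Pre_find_phrase_idx_py phrase_list token_text → Spec_find_phrase_idx_py phrase_list token_text (find_phrase_idx_py phrase_list token_text)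

-- ===== LEMMAS AND PROOFS =====

-- positions recorded for w are exactly the enumerate indices whose token is w
theorem pvStarts_getD (token_text : List String) (w : String) :
    (pvStarts token_text).getD w [] =
      ((PySem.List.enumerate token_text 0).filter (fun q => q.2 == w)).map (fun q => q.1) := by
  unfold pvStarts
  rw [PySem.Dict.getD_foldl_modify_append]
  simp [List.filter_map, Function.comp_def]

-- a slice match at enumerate entry q forces the token at q to be the first word
theorem match_mem_first (token_text : List String) (w : String) (rest : List String)
    (q : Int × String) (hq : q ∈ PySem.List.enumerate token_text 0)
    (h : w :: rest = PySem.List.slice token_text (some q.1) (some (q.1 + ((w :: rest).length : Int)))) :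
    q.2 = w := by
  rcases (PySem.List.mem_enumerate_iff _ _ _).1 hq with ⟨k, hk, rfl⟩
  simp only [List.length_cons, zero_add] at h ⊢
  rw [PySem.List.slice_natCast_add] at h
  rw [show List.drop k token_text = token_text[k] :: List.drop (k + 1) token_text from
        (List.getElem_cons_drop hk).symm,
      List.take_succ_cons] at h
  injection h with h1 _
  exact h1.symm

-- the inner per-phrase computations agree (for a nonempty phrase)
theorem inner_eq (token_text : List String) (phrase : List String) (hne : phrase ≠ []) :
    (PySem.List.enumerate token_text 0).foldl (fun acc p =>
        if phrase == PySem.List.slice token_text (some p.1) (some (p.1 + (phrase.length : Int))) then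
          acc ++ [[p.1, p.1 + (phrase.length : Int) - 1]]
        else acc) []
      = pvLocs (pvStarts token_text) token_text phrase := by
  rw [PySem.List.foldl_append_if
    (fun p : Int × String => phrase == PySem.List.slice token_text (some p.1) (some (p.1 + (phrase.length : Int))))
    (fun p : Int × String => ([p.1, p.1 + (phrase.length : Int) - 1] : List Int))]
  cases phrase with
  | nil => exact absurd rfl hne
  | cons w rest =>
    simp only [pvLocs]
    rw [pvStarts_getD, List.filter_map, List.map_map, List.filter_filter, List.nil_append]
    simp only [Function.comp_def]
    congr 1
    apply List.filter_congr
    intro q hq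
    cases hmatch : (w :: rest == PySem.List.slice token_text (some q.1)
        (some (q.1 + (((w :: rest).length : Nat) : Int)))) with
    | false => simp
    | true =>
      have hw := match_mem_first token_text w rest q hq (beq_iff_eq.1 hmatch)
      simp [hw]

-- the outer phrase loops agree step by step (all phrases nonempty)
theorem outer_eq (token_text : List String) (phrase_list : List (List String))
    (hpre : ∀ phrase ∈ phrase_list, phrase ≠ [])
    (d : PySem.Dict (List String) (List (List Int))) :
    phrase_list.foldl (fun d phrase =>
      let phrase_loc :=
        (PySem.List.enumerate token_text 0).foldl (fun acc p =>
          if phrase == PySem.List.slice token_text (some p.1) (some (p.1 + (phrase.length : Int))) then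
            acc ++ [[p.1, p.1 + (phrase.length : Int) - 1]]
          else acc) []
      if phrase_loc.length > 0 then d.insert phrase phrase_loc else d) d
    = phrase_list.foldl (fun d phrase =>
        let locs := pvLocs (pvStarts token_text) token_text phrase
        if locs ≠ [] then d.insert phrase locs else d) d := by
  induction phrase_list generalizing d with
  | nil => rfl
  | cons ph tl ih =>
    simp only [List.foldl_cons]
    rw [inner_eq token_text ph (hpre ph List.mem_cons_self)]
    have heq : (if (pvLocs (pvStarts token_text) token_text ph).length > 0
          then d.insert ph (pvLocs (pvStarts token_text) token_text ph) else d)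
        = (if pvLocs (pvStarts token_text) token_text ph ≠ []
          then d.insert ph (pvLocs (pvStarts token_text) token_text ph) else d) := by
      rcases eq_or_ne (pvLocs (pvStarts token_text) token_text ph) [] with h | h
      · simp [h]
      · simp [h, List.length_pos_iff]
    rw [heq]
    exact ih (fun p hp => hpre p (List.mem_cons_of_mem _ hp)) _

-- ===== VERDICT (by name: the statement is the Claim_ definition above) =====
theorem find_phrase_idx_py_spec : Claim_equal_find_phrase_idx_py := by
  intro phrase_list token_text _ hpre
  unfold Spec_find_phrase_idx_py find_phrase_idx_py find_phrase_idx_py_alt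
  exact congrArg PySem.Dict.items (outer_eq token_text phrase_list hpre PySem.Dict.empty)
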